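-- pv_equiv track=rewrite | github.com/youhavetopay/Algorithm | Programmers/고득점kit/해시/4.위장.py | solution
-- ===== SOURCE A (Python) =====
-- import collections
--
-- def solution(clothes):
--
--     '''
--         나의 풀이(못품 ㅠㅠ 시간초과..)
--         옷이 주어지면 모든 옷 조합을 구하는 문제
--
--         일단 나의 접근법은
--         그냥 모든 조합을 구하는 것으로 접근했었음 ㅋㅋ
--         근데 1번테스트케이스가 시간초과로 통과를 못함 ㅋㅋ
--
--         에전에 풀었던?? 문제인데 못품 ㅋㅋㅋ
--         보니까 이전에 백준에서 한번 풀어본 기록이 있는데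
--         기억 1도 안남 ㅋㅋㅋㅋㅋㅋㅋㅋㅋ
--     '''
--
--     answer = len(clothes)
--
--     clothe_types = collections.defaultdict(int)
--
--     for name, type in clothes:
--         clothe_types[type] += 1
--
--     types = list(clothe_types.keys())
--
--     def dfs(max_select_count, last_select_idx, seleted_count, day):
--
--         total_day = 0
--
--         # 다 골랐으면 반환
--         if max_select_count == seleted_count:
--             return day
--
--         # 하나씩 선택
--         for i in range(last_select_idx, len(types)):
--             total_day += dfs(max_select_count, i+1, seleted_count + 1, day * clothe_types[types[i]])
--
--         return total_day
--
--     # 최소 2개부터 최대 선택할 수 있는 종류까지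
--     for i in range(2, len(clothe_types.keys())+1):
--         answer += dfs(i, 0, 0, 1)
--
--     return answer
-- ===== SOURCE B (Python) =====
-- def solution(clothes):
--     counts = {}
--     for name, type in clothes:
--         counts[type] = counts.get(type, 0) + 1
--     ans = 1
--     for c in counts.values():
--         ans *= c + 1
--     return ans - 1
-- ===== Notes on version B (the rewrite author's own statement) =====
-- stated objective: faster
-- what changed: Replaces the exponential DFS enumeration over all subsets of clothing types by the closed form: product of (count per type + 1) minus 1, computed in one counting pass plus one pass over the counts.
import Mathlib
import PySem

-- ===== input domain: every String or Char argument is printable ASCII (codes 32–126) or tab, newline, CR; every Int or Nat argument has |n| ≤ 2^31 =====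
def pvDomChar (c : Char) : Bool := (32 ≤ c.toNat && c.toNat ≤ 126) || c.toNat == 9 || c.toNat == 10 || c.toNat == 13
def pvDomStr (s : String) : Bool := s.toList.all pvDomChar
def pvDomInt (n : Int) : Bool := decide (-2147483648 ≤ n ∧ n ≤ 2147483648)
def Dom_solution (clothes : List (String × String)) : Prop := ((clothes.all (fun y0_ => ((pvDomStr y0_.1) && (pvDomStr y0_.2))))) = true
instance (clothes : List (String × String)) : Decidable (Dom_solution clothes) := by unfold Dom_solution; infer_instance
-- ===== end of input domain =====

-- B replaces A's exponential DFS over all subsets of clothing types by the closed form ∏(count_per_type + 1) − 1.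

-- ===== PORT A =====
-- Python's inner `dfs(max_select_count, last_select_idx, seleted_count, day)`:
-- the `for i in range(last_select_idx, len(types))` loop is written as structural
-- recursion on the index: the first summand is the loop body at i = lastIdx, the
-- second summand is the rest of the loop (re-entering with the same k, s, day:
-- since k ≠ s holds there, that call performs exactly the remaining iterations).
def solutionDfs (cnts : PySem.Dict String Int) (types : List String)
    (k s day : Int) (lastIdx : Nat) : Int :=
  if k = s then day
  else if h : lastIdx < types.length then
    solutionDfs cnts types k (s + 1) (day * cnts.getD types[lastIdx] 0) (lastIdx + 1)
      + solutionDfs cnts types k s day (lastIdx + 1)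
  else 0
termination_by types.length - lastIdx

def solution (clothes : List (String × String)) : Int :=
  let answer : Int := clothes.length
  let clothe_types := clothes.foldl (fun d p => d.modify p.2 0 (· + 1)) PySem.Dict.empty
  let types := clothe_types.keys
  (PySem.List.pyRange 2 ((types.length : Int) + 1) 1).foldl
    (fun acc i => acc + solutionDfs clothe_types types i 0 1 0) answer

-- ===== PORT B =====
def solution_alt (clothes : List (String × String)) : Int :=
  let counts := clothes.foldl (fun d p => d.insert p.2 (d.getD p.2 0 + 1)) PySem.Dict.empty
  counts.values.foldl (fun ans c => ans * (c + 1)) 1 - 1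

-- ===== PRECONDITION & SPEC =====
def Spec_solution (clothes : List (String × String)) (out : Int) : Prop := out = solution_alt clothes
instance (clothes : List (String × String)) (out : Int) : Decidable (Spec_solution clothes out) := by unfold Spec_solution; infer_instance

-- ===== CLAIM (what is proved, stated in full; the proofs are below) =====
def Claim_equal_solution : Prop := ∀ (clothes : List (String × String)), Dom_solution clothes → Spec_solution clothes (solution clothes)

-- ===== LEMMAS AND PROOFS =====

def esym : Nat → List Int → Int
  | 0, _ => 1
  | _ + 1, [] => 0
  | j + 1, c :: cs => c * esym j cs + esym (j + 1) cs

theorem esym_eq_zero_of_length_lt (j : Nat) (cs : List Int) (h : cs.length < j) :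
    esym j cs = 0 := by
  induction cs generalizing j with
  | nil => cases j with
    | zero => omega
    | succ j => rfl
  | cons c cs ih =>
    cases j with
    | zero => omega
    | succ j =>
      simp only [esym]
      rw [ih j (by simpa using h), ih (j+1) (by simp at h ⊢; omega)]
      ring

theorem esym_one (cs : List Int) : esym 1 cs = cs.sum := by
  induction cs with
  | nil => rfl
  | cons c cs ih => simp [esym, ih]

theorem prod_add_one_eq_sum_esym (cs : List Int) :
    (cs.map (· + 1)).prod = ((List.range (cs.length + 1)).map (fun j => esym j cs)).sum := by
  induction cs with
  | nil => simp [esym]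
  | cons c cs ih =>
    have hsplit : ((List.range (cs.length + 2)).map (fun j => esym j (c :: cs))).sum
        = 1 + c * ((List.range (cs.length + 1)).map (fun j => esym j cs)).sum
          + ((List.range (cs.length + 1)).map (fun j => esym (j + 1) cs)).sum := by
      rw [List.range_succ_eq_map]
      simp only [List.map_cons, List.map_map, List.sum_cons, Function.comp_def, esym]
      rw [List.sum_map_add, List.sum_map_mul_left]
      ring
    have htail : ((List.range (cs.length + 1)).map (fun j => esym (j + 1) cs)).sum
        = ((List.range (cs.length + 1)).map (fun j => esym j cs)).sum - 1 := by
      have h1 : ((List.range (cs.length + 1)).map (fun j => esym (j + 1) cs)).sum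
          = ((List.range cs.length).map (fun j => esym (j + 1) cs)).sum
            + esym (cs.length + 1) cs := by
        rw [List.range_succ]; simp
      have h2 : ((List.range (cs.length + 1)).map (fun j => esym j cs)).sum
          = 1 + ((List.range cs.length).map (fun j => esym (j + 1) cs)).sum := by
        rw [List.range_succ_eq_map]
        simp [List.map_map, Function.comp_def, esym]
      rw [h1, h2, esym_eq_zero_of_length_lt (cs.length + 1) cs (by omega)]
      ring
    show _ = ((List.range (cs.length + 2)).map (fun j => esym j (c :: cs))).sum
    rw [hsplit, htail, List.map_cons, List.prod_cons, ih]
    ring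
theorem solutionDfs_esym (cnts : PySem.Dict String Int) (types : List String)
    (k : Int) (lastIdx : Nat) (s day : Int) (hks : s ≤ k) :
    solutionDfs cnts types k s day lastIdx
      = day * esym (k - s).toNat ((types.drop lastIdx).map (fun t => cnts.getD t 0)) := by
  induction hn : types.length - lastIdx generalizing lastIdx s day with
  | zero =>
    rw [solutionDfs]
    have hge : types.length ≤ lastIdx := by omega
    rw [List.drop_eq_nil_of_le hge]
    by_cases hk : k = s
    · simp [hk, esym]
    · simp only [if_neg hk, dif_neg (by omega : ¬ lastIdx < types.length)]
      have hpos : 0 < (k - s).toNat := by omega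
      obtain ⟨m, hm⟩ := Nat.exists_eq_succ_of_ne_zero hpos.ne'
      rw [hm]
      simp [esym]
  | succ n ih =>
    rw [solutionDfs]
    by_cases hk : k = s
    · simp [hk, esym]
    · have hlt : lastIdx < types.length := by omega
      simp only [if_neg hk, dif_pos hlt]
      have hdrop : types.drop lastIdx = types[lastIdx] :: types.drop (lastIdx + 1) :=
        List.drop_eq_getElem_cons hlt
      rw [ih (lastIdx + 1) (s + 1) _ (by omega) (by omega),
          ih (lastIdx + 1) s day hks (by omega), hdrop]
      obtain ⟨m, hm⟩ : ∃ m, (k - s).toNat = m + 1 :=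
        Nat.exists_eq_succ_of_ne_zero (by omega)
      have hm' : (k - (s + 1)).toNat = m := by omega
      simp only [List.map_cons, hm, hm', esym]
      ring

theorem sum_pyRange_esym (cs : List Int) (t : Nat) (ht : 1 ≤ t) :
    ((PySem.List.pyRange 2 ((t : Int) + 1) 1).map (fun i => esym i.toNat cs)).sum
      = ((List.range (t + 1)).map (fun j => esym j cs)).sum - 1 - esym 1 cs := by
  induction t with
  | zero => omega
  | succ n ih =>
    by_cases hn : 1 ≤ n
    · have h2 : (2 : Int) ≤ (n : Int) + 1 := by omega
      rw [show ((n + 1 : Nat) : Int) + 1 = ((n : Int) + 1) + 1 by push_cast; ring,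
          PySem.List.pyRange_one_succ_right h2,
          List.map_append, List.sum_append, ih hn,
          List.range_succ (n := n + 1), List.map_append, List.sum_append]
      have : ((n : Int) + 1).toNat = n + 1 := by omega
      simp [this]
      ring
    · have hn0 : n = 0 := by omega
      subst hn0
      have hc : (((0 + 1 : Nat) : Int) + 1) = 2 := by norm_num
      rw [hc, PySem.List.pyRange_one_eq_nil (le_refl 2)]
      simp [List.range_succ, esym]

theorem solution_eq_alt (clothes : List (String × String)) : solution clothes = solution_alt clothes := by
  have hA : clothes.foldl (fun d p => d.modify p.2 0 (· + 1)) PySem.Dict.empty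
      = PySem.Dict.counter (clothes.map (·.2)) := by
    rw [PySem.Dict.counter_eq_foldl, List.foldl_map]
  have hB : clothes.foldl (fun d p => d.insert p.2 (d.getD p.2 0 + 1)) PySem.Dict.empty
      = PySem.Dict.counter (clothes.map (·.2)) := by
    rw [← PySem.Dict.foldl_insert_getD_add_one_eq_counter, List.foldl_map]
  set ts := clothes.map (·.2) with hts
  set d := PySem.Dict.counter ts with hd
  set cs := d.values with hcs
  -- B's value
  have hBval : solution_alt clothes = (cs.map (· + 1)).prod - 1 := by
    unfold solution_alt
    rw [hB, List.prod_eq_foldl, List.foldl_map]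
  have hlen : cs.length = d.keys.length := by
    simp [hcs, PySem.Dict.values, PySem.Dict.keys]
  have hsum : cs.sum = (ts.length : Int) := by
    have h1 : cs = (PySem.Set.ofList ts).map (fun k => (ts.count k : Int)) := by
      rw [hcs, PySem.Dict.values_eq_map_keys d (PySem.Dict.nodup_keys_counter ts) 0, hd,
        PySem.Dict.keys_counter]
      exact List.map_congr_left (fun k _ => by rw [← hd, PySem.Dict.getD_counter])
    have hperm : (PySem.Set.ofList ts).Perm ts.dedup := by
      rw [List.perm_ext_iff_of_nodup (PySem.Set.nodup_ofList ts) ts.nodup_dedup]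
      intro a; simp [PySem.Set.mem_ofList]
    have h2 : ((PySem.Set.ofList ts).map (fun k => (ts.count k : Int))).sum
        = ((ts.dedup).map (fun k => (ts.count k : Int))).sum :=
      (hperm.map _).sum_eq
    rw [h1, h2]
    push_cast [← List.sum_map_count_dedup_eq_length ts, List.map_map]
    rfl
  -- A's value
  have hAval : solution clothes
      = (ts.length : Int) + ((PySem.List.pyRange 2 ((d.keys.length : Int) + 1) 1).map
          (fun i => esym i.toNat cs)).sum := by
    unfold solution
    rw [hA]
    rw [PySem.List.foldl_add]
    congr 1
    · simp [hts]
    · refine congrArg List.sum (List.map_congr_left ?_)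
      intro i hi
      have h2i : 2 ≤ i := (PySem.List.mem_pyRange_one.mp hi).1
      rw [solutionDfs_esym d d.keys i 0 0 1 (by omega)]
      rw [List.drop_zero, ← PySem.Dict.values_eq_map_keys d (PySem.Dict.nodup_keys_counter ts) 0]
      simp
      rfl
  by_cases hnil : ts = []
  · have : clothes = [] := by
      have := congrArg List.length hnil
      simpa [hts] using this
    subst this
    decide
  · have ht1 : 1 ≤ d.keys.length := by
      have hmem : ts.head hnil ∈ d.keys := by
        rw [hd, PySem.Dict.keys_counter]
        exact (PySem.Set.mem_ofList ts _).2 (List.head_mem hnil)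
      exact List.length_pos_of_mem hmem
    rw [hAval, hBval, sum_pyRange_esym cs d.keys.length ht1, prod_add_one_eq_sum_esym, hlen,
      esym_one, hsum]
    ring

-- ===== VERDICT (by name: the statement is the Claim_ definition above) =====
theorem solution_spec : Claim_equal_solution := by
  intro clothes _
  unfold Spec_solution
  exact solution_eq_alt clothes
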